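-- pv_equiv track=rewrite | github.com/ket0825/baekjoon_algorithm | retry/candy_game3085.py | count_consecutive_color
-- ===== SOURCE A (Python) =====
-- def count_consecutive_color(mat: list[list[str]]
--                             ) -> list[int]:
--     consecutive_color_count_list = []
--     for row in mat:
--         consecutive_color_count = 0
--         cur_color = None
--         prev_color = None
--         for col in row:
--             cur_color = col
--             if cur_color != prev_color and prev_color != None:
--                 consecutive_color_count_list.append(consecutive_color_count)
--                 consecutive_color_count = 1
--                 prev_color = cur_color
--             else:
--                 prev_color = cur_color
--                 consecutive_color_count+=1
--         consecutive_color_count_list.append(consecutive_color_count)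
--
--     return consecutive_color_count_list
-- ===== SOURCE B (Python) =====
-- def count_consecutive_color(mat: list[list[str]]) -> list[int]:
--     out = []
--     for row in mat:
--         bounds = [0]
--         bounds += [i for i, (x, y) in enumerate(zip(row, row[1:]), 1) if x != y]
--         bounds.append(len(row))
--         out.extend(b - a for a, b in zip(bounds, bounds[1:]))
--     return out
-- ===== Notes on version B (the rewrite author's own statement) =====
-- stated objective: alternative
-- what changed: Replaces A's running-counter-with-flush state machine by a locate-transitions decomposition: per row collect boundary indices where the color changes (plus 0 and len(row)) and emit run lengths as pairwise differences of adjacent boundaries.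
import Mathlib
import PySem

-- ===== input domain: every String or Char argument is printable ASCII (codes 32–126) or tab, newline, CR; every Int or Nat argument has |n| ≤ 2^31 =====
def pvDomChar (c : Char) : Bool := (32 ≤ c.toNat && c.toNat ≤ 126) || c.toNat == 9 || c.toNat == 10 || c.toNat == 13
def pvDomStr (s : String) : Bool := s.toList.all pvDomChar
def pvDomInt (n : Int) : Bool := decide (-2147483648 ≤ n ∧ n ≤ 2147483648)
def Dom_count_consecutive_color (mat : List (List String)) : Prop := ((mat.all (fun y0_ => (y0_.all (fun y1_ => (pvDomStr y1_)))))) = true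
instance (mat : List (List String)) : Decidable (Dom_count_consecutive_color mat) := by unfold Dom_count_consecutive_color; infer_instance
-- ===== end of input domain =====

-- B replaces A's running-counter-with-flush loop by boundary indices (color-change
-- positions plus 0 and len(row)) and pairwise differences; same cost, different decomposition.
-- ===== PORT A =====
-- inner-loop body of A: state = (consecutive_color_count_list, consecutive_color_count, prev_color)
def pvStepA (st : List Int × Int × Option String) (col : String) : List Int × Int × Option String :=
  let lst := st.1
  let cnt := st.2.1
  let prev := st.2.2
  if some col ≠ prev ∧ prev ≠ none then (lst ++ [cnt], 1, some col)
  else (lst, cnt + 1, some col)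

def count_consecutive_color (mat : List (List String)) : List Int :=
  mat.foldl (fun acc row =>
    let r := row.foldl pvStepA (acc, 0, none)
    r.1 ++ [r.2.1]) []

-- ===== PORT B =====
-- per-row body of B: bounds = [0] + change positions + [len(row)]; runs = adjacent differences
def pvRowRuns (row : List String) : List Int :=
  let bounds : List Int :=
    0 :: (((PySem.List.enumerate (row.zip (row.drop 1)) 1).filter
            (fun p => p.2.1 ≠ p.2.2)).map (·.1) ++ [(row.length : Int)])
  (bounds.zip (bounds.drop 1)).map (fun q => q.2 - q.1)

def count_consecutive_color_alt (mat : List (List String)) : List Int :=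
  mat.foldl (fun out row => out ++ pvRowRuns row) []

-- ===== PRECONDITION & SPEC =====
def Spec_count_consecutive_color (mat : List (List String)) (out : List Int) : Prop := out = count_consecutive_color_alt mat
instance (mat : List (List String)) (out : List Int) : Decidable (Spec_count_consecutive_color mat out) := by unfold Spec_count_consecutive_color; infer_instance

-- ===== CLAIM (what is proved, stated in full; the proofs are below) =====
def Claim_equal_count_consecutive_color : Prop := ∀ (mat : List (List String)), Dom_count_consecutive_color mat → Spec_count_consecutive_color mat (count_consecutive_color mat)

-- ===== LEMMAS AND PROOFS =====

-- ===== VERDICT (by name: the statement is the Claim_ definition above) =====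
-- reference run-length function: runs of row x::xs are pvRunsRef x 1 xs
def pvRunsRef (c : String) (k : Int) : List String → List Int
  | [] => [k]
  | x :: xs => if x = c then pvRunsRef c (k + 1) xs else k :: pvRunsRef x 1 xs

-- boundary positions (indices whose color differs from the predecessor), predecessor color c, next index i
def pvBnd (c : String) (xs : List String) (i : Int) : List Int :=
  match xs with
  | [] => []
  | x :: xs => if x = c then pvBnd x xs (i + 1) else i :: pvBnd x xs (i + 1)

lemma foldA_runs (xs : List String) : ∀ (lst : List Int) (k : Int) (c : String),
    (let r := xs.foldl pvStepA (lst, k, some c); r.1 ++ [r.2.1]) = lst ++ pvRunsRef c k xs := by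
  induction xs with
  | nil => intro lst k c; simp [pvRunsRef]
  | cons x xs ih =>
    intro lst k c
    by_cases h : x = c
    · subst h
      simpa [pvStepA, pvRunsRef] using ih lst (k + 1) x
    · have := ih (lst ++ [k]) 1 x
      simp [pvStepA, h, pvRunsRef] at this ⊢
      simp [this]

lemma enum_filter_bnd (xs : List String) : ∀ (c : String) (i : Int),
    ((PySem.List.enumerate ((c :: xs).zip xs) i).filter (fun p => p.2.1 ≠ p.2.2)).map (·.1)
      = pvBnd c xs i := by
  induction xs with
  | nil => intro c i; simp [pvBnd, PySem.List.enumerate_nil]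
  | cons x xs ih =>
    intro c i
    by_cases h : x = c
    · subst h
      simpa [PySem.List.enumerate_cons, pvBnd] using ih x (i + 1)
    · have hb : ¬ (c = x) := fun hc => h hc.symm
      simpa [PySem.List.enumerate_cons, pvBnd, h, hb] using ih x (i + 1)

lemma diffs_bnd (xs : List String) : ∀ (c : String) (p k : Int),
    (let rest := pvBnd c xs (p + k) ++ [p + k + (xs.length : Int)]
     (((p :: rest).zip rest).map (fun q => q.2 - q.1))) = pvRunsRef c k xs := by
  induction xs with
  | nil => intro c p k; simp [pvBnd, pvRunsRef]
  | cons x xs ih =>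
    intro c p k
    have hlen : (p + k + ((x :: xs).length : Int)) = p + (k + 1) + (xs.length : Int) := by
      simp; ring
    by_cases h : x = c
    · subst h
      have := ih x p (k + 1)
      simp only [pvBnd, pvRunsRef, hlen] at this ⊢
      have harg : p + k + 1 = p + (k + 1) := by ring
      rw [harg]
      exact this
    · have := ih x (p + k) 1
      have hlen2 : (p + k + ((x :: xs).length : Int)) = (p + k) + 1 + (xs.length : Int) := by
        simp; ring
      simp only [pvBnd, pvRunsRef, if_neg h, hlen2] at this ⊢
      simp only [List.cons_append, List.zip_cons_cons, List.map_cons]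
      rw [this]
      simp

lemma rowRuns_eq (row : List String) :
    pvRowRuns row = (match row with | [] => [0] | x :: xs => pvRunsRef x 1 xs) := by
  match row with
  | [] => simp [pvRowRuns]
  | x :: xs =>
    have hz : (x :: xs).zip ((x :: xs).drop 1) = (x :: xs).zip xs := by simp
    have he := enum_filter_bnd xs x 1
    have hd := diffs_bnd xs x 0 1
    simp only [pvRowRuns, hz, he]
    simp only [zero_add] at hd
    have hl : ((x :: xs).length : Int) = 0 + 1 + (xs.length : Int) := by simp; ring
    rw [hl]
    simpa using hd

lemma rowA_eq (acc : List Int) (row : List String) :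
    (let r := row.foldl pvStepA (acc, 0, none); r.1 ++ [r.2.1]) = acc ++ pvRowRuns row := by
  rw [rowRuns_eq]
  match row with
  | [] => simp
  | x :: xs =>
    have := foldA_runs xs acc 1 x
    simpa [pvStepA] using this

lemma ports_eq (mat : List (List String)) : ∀ (acc : List Int),
    mat.foldl (fun acc row => (let r := row.foldl pvStepA (acc, 0, none); r.1 ++ [r.2.1])) acc
      = mat.foldl (fun out row => out ++ pvRowRuns row) acc := by
  induction mat with
  | nil => intro acc; rfl
  | cons row mat ih =>
    intro acc
    simp only [List.foldl_cons]
    rw [rowA_eq acc row]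
    exact ih _

-- ===== VERDICT =====
theorem count_consecutive_color_spec : Claim_equal_count_consecutive_color := by
  intro mat _
  unfold Spec_count_consecutive_color count_consecutive_color count_consecutive_color_alt
  exact ports_eq mat []
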